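-- pv_equiv track=rewrite | github.com/iqbal-lab-org/gramtools | py_interface/parse_prg.py | decode_prg
-- ===== SOURCE A (Python) =====
-- var_marker_chars = set('0123456789')
--
-- class IterPeek:
--     """An iterator which stores the next (future) value for peeking."""
--
--     def __init__(self, iterable):
--         self.iter = iter(iterable)
--         self.peek = None
--         self.stop_flag = False
--
--     def __iter__(self):
--         return self
--
--     def __next__(self):
--         if self.stop_flag:
--             raise StopIteration
--
--         if self.peek is None:
--             current = next(self.iter)
--         else:
--             current = self.peek
--
--         try:
--             self.peek = next(self.iter)
--         except StopIteration:
--             self.peek = None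
--             self.stop_flag = True
--         return current
--
-- def decode_prg(prg):
--     """Decode prg by concatenating variant site marker digits."""
--     iter_prg = IterPeek(prg)
--     marker = ''
--     for x in iter_prg:
--         if x not in var_marker_chars:
--             yield x
--             continue
--
--         marker += x
--         if iter_prg.peek in var_marker_chars:
--             continue
--         else:
--             x = marker
--             marker = ''
--         yield x
-- ===== SOURCE B (Python) =====
-- from itertools import groupby
--
-- var_marker_chars = set('0123456789')
--
-- def decode_prg(prg):
--     """Decode prg by concatenating variant site marker digits."""
--     for is_marker, group in groupby(prg, key=lambda c: c in var_marker_chars):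
--         if is_marker:
--             yield ''.join(group)
--         else:
--             yield from group
-- ===== Notes on version B (the rewrite author's own statement) =====
-- stated objective: idiomatic
-- what changed: Replaced the custom IterPeek lookahead iterator and manual marker accumulation with itertools.groupby over the digit-membership key, yielding digit runs joined and other runs character by character.
import Mathlib
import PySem

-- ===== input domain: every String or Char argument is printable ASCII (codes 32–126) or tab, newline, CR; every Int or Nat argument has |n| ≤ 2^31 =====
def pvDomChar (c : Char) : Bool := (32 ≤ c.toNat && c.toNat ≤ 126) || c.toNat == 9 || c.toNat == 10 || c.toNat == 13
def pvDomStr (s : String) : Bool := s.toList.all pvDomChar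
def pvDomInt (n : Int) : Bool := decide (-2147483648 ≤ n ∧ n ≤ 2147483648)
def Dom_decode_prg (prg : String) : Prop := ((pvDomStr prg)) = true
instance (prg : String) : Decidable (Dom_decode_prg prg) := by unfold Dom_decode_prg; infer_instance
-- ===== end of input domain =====

-- B replaces A's IterPeek lookahead state machine with grouping of maximal
-- digit / non-digit runs (itertools.groupby); objective: more idiomatic, same cost.

-- var_marker_chars = set('0123456789'); both programs test 'c in var_marker_chars'
def markerChar (c : Char) : Bool := "0123456789".toList.contains c

-- ===== PORT A =====
-- A's generator loop over IterPeek: current char x, peek = head of the rest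
-- (peek is None at the end, and 'None in var_marker_chars' is False).
def decodeGoA : List Char → String → List String
  | [], _ => []
  | x :: rest, marker =>
    if ¬ markerChar x then
      x.toString :: decodeGoA rest marker          -- yield x; continue
    else
      let marker' := marker.push x                 -- marker += x
      match rest with
      | [] => marker' :: decodeGoA [] ""           -- peek is None: yield marker
      | y :: t =>
        if markerChar y then decodeGoA (y :: t) marker'   -- peek is a digit: continue
        else marker' :: decodeGoA (y :: t) ""      -- x = marker; marker = ''; yield x

def decode_prg (prg : String) : List String := decodeGoA prg.toList ""

-- ===== PORT B =====
-- groupby(prg, key = c in var_marker_chars): each group is the maximal run with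
-- the same key; a digit group is joined into one token, others yielded char by char.
def decodeGoB : List Char → List String
  | [] => []
  | x :: rest =>
    let key := markerChar x
    let grp := List.takeWhile (fun c => markerChar c == key) (x :: rest)
    let rest' := List.dropWhile (fun c => markerChar c == key) (x :: rest)
    if key then String.ofList grp :: decodeGoB rest'      -- yield ''.join(group)
    else grp.map (fun c => c.toString) ++ decodeGoB rest' -- yield from group
  termination_by l => l.length
  decreasing_by
    all_goals simp only [List.dropWhile_cons, beq_self_eq_true, if_true]
    all_goals exact Nat.lt_succ_of_le (List.length_dropWhile_le _ _)

def decode_prg_alt (prg : String) : List String := decodeGoB prg.toList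

-- ===== PRECONDITION & SPEC =====
def Spec_decode_prg (prg : String) (out : List String) : Prop := out = decode_prg_alt prg
instance (prg : String) (out : List String) : Decidable (Spec_decode_prg prg out) := by unfold Spec_decode_prg; infer_instance

-- ===== CLAIM (what is proved, stated in full; the proofs are below) =====
def Claim_equal_decode_prg : Prop := ∀ (prg : String), Dom_decode_prg prg → Spec_decode_prg prg (decode_prg prg)

-- ===== LEMMAS AND PROOFS =====

-- one-step unfoldings of A's loop
theorem goA_nonmarker (x : Char) (rest : List Char) (m : String) (h : markerChar x = false) :
    decodeGoA (x :: rest) m = x.toString :: decodeGoA rest m := by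
  rw [decodeGoA]; simp [h]

theorem goA_marker_nil (x : Char) (m : String) (h : markerChar x = true) :
    decodeGoA [x] m = [m.push x] := by
  rw [decodeGoA]; simp [h, decodeGoA]

theorem goA_marker_marker (x y : Char) (t : List Char) (m : String)
    (hx : markerChar x = true) (hy : markerChar y = true) :
    decodeGoA (x :: y :: t) m = decodeGoA (y :: t) (m.push x) := by
  rw [decodeGoA]; simp [hx, hy]

theorem goA_marker_non (x y : Char) (t : List Char) (m : String)
    (hx : markerChar x = true) (hy : markerChar y = false) :
    decodeGoA (x :: y :: t) m = m.push x :: decodeGoA (y :: t) "" := by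
  rw [decodeGoA]; simp [hx, hy]

-- one-step unfoldings of B's grouping loop
theorem goB_marker (x : Char) (rest : List Char) (h : markerChar x = true) :
    decodeGoB (x :: rest) =
      String.ofList (x :: rest.takeWhile markerChar) :: decodeGoB (rest.dropWhile markerChar) := by
  rw [decodeGoB]; simp [h, List.takeWhile, List.dropWhile]

theorem goB_non (x : Char) (rest : List Char) (h : markerChar x = false) :
    decodeGoB (x :: rest) =
      x.toString :: ((rest.takeWhile (fun c => markerChar c == false)).map (fun c => c.toString)
        ++ decodeGoB (rest.dropWhile (fun c => markerChar c == false))) := by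
  rw [decodeGoB]; simp [h, List.takeWhile, List.dropWhile]

theorem head_dropWhile_false (p : Char → Bool) (l : List Char) (y : Char)
    (h : (l.dropWhile p).head? = some y) : p y = false := by
  have := List.head?_dropWhile_not p l
  rw [h] at this; simpa using this

-- pushing a char onto the accumulated marker, seen on the list side
theorem push_ofList (m : String) (d : Char) : m.push d = String.ofList (m.toList ++ [d]) := by
  apply String.toList_inj.mp; simp

-- A consumes a maximal digit run, accumulating it onto the pending marker
theorem decodeGoA_run (run : List Char) (hne : run ≠ []) (hall : ∀ c ∈ run, markerChar c = true)
    (rest : List Char) (hrest : ∀ y, rest.head? = some y → markerChar y = false) (m : String) :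
    decodeGoA (run ++ rest) m = String.ofList (m.toList ++ run) :: decodeGoA rest "" := by
  induction run generalizing m with
  | nil => exact absurd rfl hne
  | cons d run' ih =>
    have hd : markerChar d = true := hall d List.mem_cons_self
    cases run' with
    | nil =>
      cases rest with
      | nil => simpa [goA_marker_nil d m hd, decodeGoA] using push_ofList m d
      | cons y t =>
        have hy : markerChar y = false := hrest y rfl
        simpa [goA_marker_non d y t m hd hy] using push_ofList m d
    | cons d2 run'' =>
      have hd2 : markerChar d2 = true := hall d2 (by simp)
      simp only [List.cons_append]
      rw [goA_marker_marker d d2 (run'' ++ rest) m hd hd2]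
      rw [← List.cons_append, ih (by simp) (fun c hc => hall c (by simp [List.mem_cons] at hc ⊢; tauto)) (m.push d)]
      simp

-- B emits a non-digit run character by character: absorbing one run step back is the identity
theorem goB_absorb (rest : List Char) :
    (rest.takeWhile (fun c => markerChar c == false)).map (fun c => c.toString)
      ++ decodeGoB (rest.dropWhile (fun c => markerChar c == false)) = decodeGoB rest := by
  cases rest with
  | nil => simp
  | cons y t =>
    cases hy : markerChar y with
    | true => simp [hy]
    | false => rw [goB_non y t hy]; simp [hy]

theorem decode_main : ∀ (l : List Char), decodeGoA l "" = decodeGoB l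
  | [] => by rw [decodeGoB]; rfl
  | x :: rest => by
    cases hx : markerChar x with
    | false =>
      rw [goA_nonmarker x rest "" hx, decode_main rest, goB_non x rest hx, goB_absorb rest]
    | true =>
      have hsplit : List.takeWhile markerChar (x :: rest) ++ List.dropWhile markerChar (x :: rest)
          = x :: rest := List.takeWhile_append_dropWhile
      have htake : List.takeWhile markerChar (x :: rest) = x :: rest.takeWhile markerChar := by
        simp [hx]
      have hdrop : List.dropWhile markerChar (x :: rest) = rest.dropWhile markerChar := by
        simp [hx]
      have hrun := decodeGoA_run (List.takeWhile markerChar (x :: rest))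
        (by simp [htake]) (fun c hc => List.mem_takeWhile_imp hc)
        (List.dropWhile markerChar (x :: rest))
        (fun y hy => head_dropWhile_false markerChar (x :: rest) y hy) ""
      rw [hsplit] at hrun
      rw [hrun, htake, hdrop, decode_main (rest.dropWhile markerChar), goB_marker x rest hx]
      simp
  termination_by l => l.length
  decreasing_by
    · simp
    · exact Nat.lt_succ_of_le (List.length_dropWhile_le _ _)

-- ===== VERDICT (by name: the statement is the Claim_ definition above) =====
theorem decode_prg_spec : Claim_equal_decode_prg := by
  intro prg _
  unfold Spec_decode_prg decode_prg decode_prg_alt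
  exact decode_main prg.toList
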